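-- pv_equiv track=rewrite | github.com/helen1126/Collation-of-ODISE | data/build.py | prompt_labels
-- ===== SOURCE A (Python) =====
-- import copy
--
-- def prompt_labels(labels, prompt):
--     """
--     根据指定的提示格式对标签进行处理。
--
--     参数:
--     labels (list): 双重列表格式的标签，每个子列表包含一个类别的标签名称
--     prompt (str or None): 提示格式，必须是 "a", "photo", "scene" 之一，若为 None 则不进行处理
--
--     返回:
--     list: 处理后的双重列表格式的标签
--     """
--     if prompt is None:
--         return labels
--     labels = copy.deepcopy(labels)
--     assert prompt in ["a", "photo", "scene"]
--     if prompt == "a":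
--         for i in range(len(labels)):
--             labels[i] = [f"a {l}" for l in labels[i]]
--     elif prompt == "photo":
--         for i in range(len(labels)):
--             labels[i] = [f"a photo of a {l}." for l in labels[i]]
--     elif prompt == "scene":
--         for i in range(len(labels)):
--             labels[i] = [f"a photo of a {l} in the scene." for l in labels[i]]
--     else:
--         raise NotImplementedError
--
--     return labels
-- ===== SOURCE B (Python) =====
-- def prompt_labels(labels, prompt):
--     if prompt is None:
--         return labels
--     assert prompt in ["a", "photo", "scene"]
--     template = {"a": "a {}", "photo": "a photo of a {}.",
--                 "scene": "a photo of a {} in the scene."}[prompt]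
--     # Stage 1: flatten everything and format in one flat pass.
--     flat = [template.format(l) for row in labels for l in row]
--     # Stage 2: rebuild the nested shape by slicing the flat list.
--     out = []
--     i = 0
--     for row in labels:
--         out.append(flat[i:i + len(row)])
--         i += len(row)
--     return out
-- ===== Notes on version B (the rewrite author's own statement) =====
-- stated objective: alternative
-- what changed: Instead of A's deepcopy plus a three-way branch with three per-row rewriting loops, B flattens all labels into one flat list, formats them in a single flat pass with one template, and then reconstructs the nested shape in a second pass by slicing the flat list with a running offset.
import Mathlib
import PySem

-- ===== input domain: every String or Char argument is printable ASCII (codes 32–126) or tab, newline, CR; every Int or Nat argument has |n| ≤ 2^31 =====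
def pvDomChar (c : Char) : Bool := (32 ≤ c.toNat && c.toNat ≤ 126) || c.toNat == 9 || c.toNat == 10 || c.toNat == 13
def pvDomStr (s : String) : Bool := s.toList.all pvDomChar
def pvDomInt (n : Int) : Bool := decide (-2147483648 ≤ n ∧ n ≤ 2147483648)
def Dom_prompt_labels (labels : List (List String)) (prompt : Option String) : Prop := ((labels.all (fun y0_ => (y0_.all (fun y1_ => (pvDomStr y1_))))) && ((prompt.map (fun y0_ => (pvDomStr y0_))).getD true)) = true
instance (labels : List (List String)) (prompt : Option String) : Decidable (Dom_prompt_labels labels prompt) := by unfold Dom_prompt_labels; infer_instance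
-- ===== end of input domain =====

-- B replaces A's three per-row rewriting loops by a flatten / one flat formatting pass /
-- rebuild-by-slicing decomposition (objective: alternative structure, same cost).

-- ===== PORT A =====
-- literal transliteration: deepcopy is the identity on immutable Lean values; the
-- fall-through after a failed assert is unreachable under Pre_prompt_labels.
def prompt_labels (labels : List (List String)) (prompt : Option String) : List (List String) :=
  match prompt with
  | none => labels
  | some p =>
    if p = "a" then
      labels.map (fun row => row.map (fun l => "a " ++ l))
    else if p = "photo" then
      labels.map (fun row => row.map (fun l => "a photo of a " ++ l ++ "."))
    else if p = "scene" then
      labels.map (fun row => row.map (fun l => "a photo of a " ++ l ++ " in the scene."))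
    else labels  -- AssertionError in Python: excluded by Pre_prompt_labels

-- ===== PORT B =====
-- template.format(l) with a single "{}" and a str argument is exactly prefix ++ l ++ suffix;
-- the template dict lookup is ported by the same key comparison chain on the literal keys.
def pvFmt (p : String) (l : String) : String :=
  if p = "a" then "a " ++ l
  else if p = "photo" then "a photo of a " ++ l ++ "."
  else "a photo of a " ++ l ++ " in the scene."

def prompt_labels_alt (labels : List (List String)) (prompt : Option String) : List (List String) :=
  match prompt with
  | none => labels
  | some p =>
    if p = "a" ∨ p = "photo" ∨ p = "scene" then
      -- stage 1: flatten and format in one flat pass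
      let flat : List String := labels.flatMap (fun row => row.map (pvFmt p))
      -- stage 2: rebuild the nested shape by slicing flat with a running offset
      (labels.foldl
        (fun (st : List (List String) × Nat) row =>
          (st.1 ++ [PySem.List.slice flat (some ((st.2 : Int))) (some ((st.2 : Int) + (row.length : Int)))],
           st.2 + row.length))
        ([], 0)).1
    else labels  -- AssertionError in Python: excluded by Pre_prompt_labels

-- ===== PRECONDITION & SPEC =====
-- Pre_ excludes exactly the prompts on which both Pythons raise AssertionError.
def Pre_prompt_labels (labels : List (List String)) (prompt : Option String) : Prop :=
  prompt = none ∨ prompt = some "a" ∨ prompt = some "photo" ∨ prompt = some "scene"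
instance (labels : List (List String)) (prompt : Option String) : Decidable (Pre_prompt_labels labels prompt) := by unfold Pre_prompt_labels; infer_instance
def pvWitness_prompt_labels : List (List String) × Option String := ([["cat", "dog"], ["tree"]], some "photo")

def Spec_prompt_labels (labels : List (List String)) (prompt : Option String) (out : List (List String)) : Prop := out = prompt_labels_alt labels prompt
instance (labels : List (List String)) (prompt : Option String) (out : List (List String)) : Decidable (Spec_prompt_labels labels prompt out) := by unfold Spec_prompt_labels; infer_instance

-- ===== CLAIM =====
def Claim_equal_prompt_labels : Prop := ∀ (labels : List (List String)) (prompt : Option String), Dom_prompt_labels labels prompt → Pre_prompt_labels labels prompt → Spec_prompt_labels labels prompt (prompt_labels labels prompt)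

-- ===== LEMMAS AND PROOFS =====
-- The rebuild fold over any suffix `ls`, started at offset n with `flat.drop n` equal to
-- the flattened formatted suffix, appends exactly the per-row formatted lists.
theorem rebuild_eq (f : String → String) :
    ∀ (ls : List (List String)) (flat : List String) (n : Nat) (acc : List (List String)),
      flat.drop n = ls.flatMap (fun row => row.map f) →
      (ls.foldl
        (fun (st : List (List String) × Nat) row =>
          (st.1 ++ [PySem.List.slice flat (some ((st.2 : Int))) (some ((st.2 : Int) + (row.length : Int)))],
           st.2 + row.length))
        (acc, n)).1 = acc ++ ls.map (fun row => row.map f) := by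
  intro ls
  induction ls with
  | nil => intro flat n acc _; simp
  | cons r ls ih =>
    intro flat n acc h
    simp only [List.flatMap_cons] at h
    have hslice : PySem.List.slice flat (some ((n : Int))) (some ((n : Int) + (r.length : Int))) = r.map f := by
      rw [PySem.List.slice_natCast_add, h]
      simp
    have hdrop : flat.drop (n + r.length) = ls.flatMap (fun row => row.map f) := by
      rw [← List.drop_drop, h]
      simp
    simp only [List.foldl_cons]
    rw [hslice, ih flat (n + r.length) (acc ++ [r.map f]) hdrop]
    simp

theorem alt_eq_map (labels : List (List String)) (p : String)
    (hp : p = "a" ∨ p = "photo" ∨ p = "scene") :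
    prompt_labels_alt labels (some p) = labels.map (fun row => row.map (pvFmt p)) := by
  show (if p = "a" ∨ p = "photo" ∨ p = "scene" then _ else labels) = _
  rw [if_pos hp]
  exact rebuild_eq (pvFmt p) labels _ 0 [] (by simp)

-- ===== VERDICT =====
theorem prompt_labels_spec : Claim_equal_prompt_labels := by
  intro labels prompt _ hpre
  unfold Spec_prompt_labels
  rcases hpre with h | h | h | h <;> subst h
  · rfl
  · rw [alt_eq_map labels "a" (by simp)]; simp [prompt_labels, pvFmt]
  · rw [alt_eq_map labels "photo" (by simp)]; simp [prompt_labels, pvFmt]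
  · rw [alt_eq_map labels "scene" (by simp)]; simp [prompt_labels, pvFmt]
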